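-- pv_equiv track=rewrite | github.com/sovyx-ai/sovyx | src/sovyx/voice/health/bypass/_linux_wireplumber_default_source.py | _extract_source_block
-- ===== SOURCE A (Python) =====
-- def _extract_source_block(long_output: str, source_name: str) -> str | None:
--     """Extract the ``Source #N`` block whose ``Name:`` matches.
--
--     ``pactl list sources`` emits one block per source separated by
--     blank lines; each block has a ``Name: <source-name>`` line we
--     can match against.
--     """
--     blocks = long_output.split("\n\n")
--     for block in blocks:
--         for line in block.splitlines():
--             stripped = line.strip()
--             if stripped.startswith("Name:") and stripped.split(":", 1)[1].strip() == source_name: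
--                 return block
--     return None
-- ===== SOURCE B (Python) =====
-- def _extract_source_block(long_output: str, source_name: str) -> str | None:
--     index = {}
--     for block in long_output.split("\n\n"):
--         for line in block.splitlines():
--             stripped = line.strip()
--             if stripped.startswith("Name:"):
--                 index.setdefault(stripped.split(":", 1)[1].strip(), block)
--     return index.get(source_name)
-- ===== Notes on version B (the rewrite author's own statement) =====
-- stated objective: alternative
-- what changed: Replaces A's short-circuiting nested scan (return inside the loops) with a single pass that builds a dict from each parsed Name value to its block (first occurrence wins via setdefault) followed by one dict lookup.
import Mathlib
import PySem

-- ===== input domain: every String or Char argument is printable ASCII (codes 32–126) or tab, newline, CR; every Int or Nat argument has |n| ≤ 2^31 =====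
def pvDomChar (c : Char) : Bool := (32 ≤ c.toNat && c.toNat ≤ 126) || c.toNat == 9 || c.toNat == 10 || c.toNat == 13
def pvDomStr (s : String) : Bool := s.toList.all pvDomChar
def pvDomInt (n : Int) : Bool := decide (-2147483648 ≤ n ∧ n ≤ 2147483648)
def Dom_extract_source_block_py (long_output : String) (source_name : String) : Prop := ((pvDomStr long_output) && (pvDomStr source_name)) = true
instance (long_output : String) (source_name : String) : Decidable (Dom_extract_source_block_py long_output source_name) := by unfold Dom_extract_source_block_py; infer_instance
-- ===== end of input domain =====

-- B replaces A's short-circuiting nested scan by one index-building pass (first Name wins via setdefault) followed by a single dict lookup; objective: alternative structure, same cost.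

-- ===== PORT A =====
-- the inner 'if' condition of A's line loop
def pvA_line (source_name : String) (line : String) : Bool :=
  let stripped := PySem.Str.strip line
  PySem.Str.startswith stripped "Name:" &&
    (match PySem.List.pyGet? ((PySem.Str.splitMax? stripped ":" 1).getD []) 1 with
     | some p => PySem.Str.strip p == source_name
     | none => false)   -- unreachable: after startswith "Name:" the split has ≥ 2 parts

-- A's inner for-loop with early 'return block' ≡ 'does some line match'
def pvA_blockMatch (source_name : String) (block : String) : Bool :=
  (PySem.Str.splitlines block).any (pvA_line source_name)

def extract_source_block_py (long_output : String) (source_name : String) : Option String :=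
  ((PySem.Str.split? long_output "\n\n").getD []).find? (pvA_blockMatch source_name)

-- ===== PORT B =====
-- parsed Name value of one line, if any (Source B's 'if stripped.startswith(...)' body)
def pvB_name? (line : String) : Option String :=
  let stripped := PySem.Str.strip line
  if PySem.Str.startswith stripped "Name:" then
    (PySem.List.pyGet? ((PySem.Str.splitMax? stripped ":" 1).getD []) 1).map PySem.Str.strip
  else none

def pvB_addLine (block : String) (d : PySem.Dict String String) (line : String) : PySem.Dict String String :=
  match pvB_name? line with
  | some n => d.setdefault n block
  | none => d

def extract_source_block_py_alt (long_output : String) (source_name : String) : Option String :=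
  (((PySem.Str.split? long_output "\n\n").getD []).foldl
      (fun d block => (PySem.Str.splitlines block).foldl (pvB_addLine block) d)
      PySem.Dict.empty).get? source_name

-- ===== PRECONDITION & SPEC =====
def Spec_extract_source_block_py (long_output : String) (source_name : String) (out : Option String) : Prop := out = extract_source_block_py_alt long_output source_name
instance (long_output : String) (source_name : String) (out : Option String) : Decidable (Spec_extract_source_block_py long_output source_name out) := by unfold Spec_extract_source_block_py; infer_instance

-- ===== CLAIM (what is proved, stated in full; the proofs are below) =====
def Claim_equal_extract_source_block_py : Prop := ∀ (long_output : String) (source_name : String), Dom_extract_source_block_py long_output source_name → Spec_extract_source_block_py long_output source_name (extract_source_block_py long_output source_name)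

-- ===== LEMMAS AND PROOFS =====

lemma pvA_line_eq (sn l : String) : pvA_line sn l = (pvB_name? l == some sn) := by
  unfold pvA_line pvB_name?
  by_cases h : PySem.Str.startswith (PySem.Str.strip l) "Name:" = true
  · simp only [h, if_pos, Bool.true_and]
    cases PySem.List.pyGet? ((PySem.Str.splitMax? (PySem.Str.strip l) ":" 1).getD []) 1 with
    | none => rfl
    | some p => rfl
  · simp only [Bool.not_eq_true] at h
    simp only [h, Bool.false_and]
    rfl

lemma pv_inner (sn block : String) (lines : List String) (d : PySem.Dict String String) :
    (lines.foldl (pvB_addLine block) d).get? sn =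
      (match d.get? sn with
       | some v => some v
       | none => if lines.any (pvA_line sn) then some block else none) := by
  induction lines generalizing d with
  | nil => cases hd : d.get? sn <;> simp [hd]
  | cons l ls ih =>
    simp only [List.foldl_cons, List.any_cons, ih, pvA_line_eq]
    cases hname : pvB_name? l with
    | none =>
      simp [pvB_addLine, hname]
    | some n =>
      simp only [pvB_addLine, hname]
      by_cases hn : n = sn
      · subst hn
        rw [PySem.Dict.get?_setdefault_self]
        cases d.get? n <;> simp
      · rw [PySem.Dict.get?_setdefault_of_ne d block (Ne.symm hn)]
        cases d.get? sn <;> simp [hn]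

lemma pv_outer (sn : String) (bs : List String) (d : PySem.Dict String String) :
    (bs.foldl (fun d block => (PySem.Str.splitlines block).foldl (pvB_addLine block) d) d).get? sn =
      (match d.get? sn with
       | some v => some v
       | none => bs.find? (pvA_blockMatch sn)) := by
  induction bs generalizing d with
  | nil => cases hd : d.get? sn <;> simp [hd]
  | cons b bs ih =>
    simp only [List.foldl_cons, ih, pv_inner sn b]
    cases hd : d.get? sn with
    | some v => simp
    | none =>
      by_cases hb : pvA_blockMatch sn b = true
      · simp [pvA_blockMatch] at hb
        simp [pvA_blockMatch, hb]
      · simp only [Bool.not_eq_true] at hb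
        have hb' : (PySem.Str.splitlines b).any (pvA_line sn) = false := hb
        simp [pvA_blockMatch, hb']

-- ===== VERDICT (by name: the statement is the Claim_ definition above) =====
theorem extract_source_block_py_spec : Claim_equal_extract_source_block_py := by
  intro lo sn _
  unfold Spec_extract_source_block_py extract_source_block_py extract_source_block_py_alt
  rw [pv_outer]
  simp
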